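-- pv_equiv track=rewrite | github.com/adamancer/nmnh_ms_tools | nmnh_ms_tools/tools/specimen_numbers/topic.py | guess_department
-- ===== SOURCE A (Python) =====
-- def guess_department(depts):
--     counts = {}
--     for dept, score in list(depts.items()):
--         try:
--             counts[dept] += score
--         except KeyError:
--             counts[dept] = score
--     return [dept for dept, count in counts.items()
--             if count == max(counts.values())][0]
-- ===== SOURCE B (Python) =====
-- def guess_department(depts):
--     # Dict keys are unique, so the summing pass is a no-op: rank the items
--     # by score descending (stable, so ties keep insertion order) and take the top.
--     ranked = sorted(depts.items(), key=lambda kv: kv[1], reverse=True)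
--     return ranked[0][0]
-- ===== Notes on version B (the rewrite author's own statement) =====
-- stated objective: faster
-- what changed: B drops A's redundant re-summing dict (dict keys are unique, so counts == depts) and the per-item max() recomputation inside A's comprehension; it stably sorts the items by score descending and returns the first key.
import Mathlib
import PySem

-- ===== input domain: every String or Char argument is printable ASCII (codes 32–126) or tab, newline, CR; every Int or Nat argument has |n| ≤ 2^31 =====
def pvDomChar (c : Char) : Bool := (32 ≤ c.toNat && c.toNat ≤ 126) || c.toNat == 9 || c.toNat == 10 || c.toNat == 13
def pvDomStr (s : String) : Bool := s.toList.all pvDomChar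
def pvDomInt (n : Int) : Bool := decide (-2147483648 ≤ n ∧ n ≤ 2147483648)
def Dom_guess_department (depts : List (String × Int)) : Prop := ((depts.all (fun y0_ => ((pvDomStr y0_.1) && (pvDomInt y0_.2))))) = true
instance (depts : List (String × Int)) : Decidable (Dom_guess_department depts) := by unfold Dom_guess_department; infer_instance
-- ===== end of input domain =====

-- B replaces A's redundant re-summing dict and per-item max() recomputation by one
-- stable descending sort of the items, returning the first (= first max-scoring) key.

-- ===== PORT A =====
def guess_department (depts : List (String × Int)) : String :=
  -- counts = {}; for dept, score in list(depts.items()): try counts[dept] += score except KeyError: counts[dept] = score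
  let counts : PySem.Dict String Int :=
    depts.foldl (fun c p =>
      match c.get? p.1 with
      | some old => c.insert p.1 (old + p.2)   -- counts[dept] += score
      | none     => c.insert p.1 p.2)          -- except KeyError: counts[dept] = score
      ⟨[]⟩
  -- [dept for dept, count in counts.items() if count == max(counts.values())][0]
  let result :=
    (counts.items.filter (fun p =>
      match PySem.List.max? counts.values (fun v => v) with
      | some m => p.2 == m
      | none   => false)).map Prod.fst         -- max([]) is never evaluated: the comprehension is empty then
  ((PySem.List.pyGet? result 0).getD "")       -- [0]; none = IndexError, excluded by Pre_

-- ===== PORT B =====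
def guess_department_alt (depts : List (String × Int)) : String :=
  -- ranked = sorted(depts.items(), key=lambda kv: kv[1], reverse=True)
  let ranked := PySem.List.sorted depts (fun kv => kv.2) true
  -- return ranked[0][0]
  match PySem.List.pyGet? ranked 0 with
  | some kv => kv.1
  | none    => ""                              -- IndexError, excluded by Pre_

-- ===== PRECONDITION & SPEC =====
-- Pre_ excludes the empty dict, on which both A and B raise IndexError, and association
-- lists with duplicate keys, which do not represent any Python dict (dict keys are unique).
def Pre_guess_department (depts : List (String × Int)) : Prop :=
  depts ≠ [] ∧ (depts.map Prod.fst).Nodup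
instance (depts : List (String × Int)) : Decidable (Pre_guess_department depts) := by
  unfold Pre_guess_department; infer_instance

def pvWitness_guess_department : (List (String × Int)) :=
  [("geology", 2), ("botany", 3), ("fishes", 3)]

def Spec_guess_department (depts : List (String × Int)) (out : String) : Prop := out = guess_department_alt depts
instance (depts : List (String × Int)) (out : String) : Decidable (Spec_guess_department depts out) := by unfold Spec_guess_department; infer_instance

-- ===== CLAIM (what is proved, stated in full; the proofs are below) =====
def Claim_equal_guess_department : Prop := ∀ (depts : List (String × Int)), Dom_guess_department depts → Pre_guess_department depts → Spec_guess_department depts (guess_department depts)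

-- ===== LEMMAS AND PROOFS =====

-- running "first maximum" of the items, seeded with m
def pvFm (m : String × Int) (t : List (String × Int)) : String × Int :=
  t.foldl (fun m x => if m.2 < x.2 then x else m) m

theorem pvFm_cons (m x : String × Int) (t : List (String × Int)) :
    pvFm m (x :: t) = pvFm (if m.2 < x.2 then x else m) t := rfl

theorem pvMax?_vals_two (a b : Int) (t : List Int) :
    PySem.List.max? (a :: b :: t) (fun v => v)
      = PySem.List.max? ((if a < b then b else a) :: t) (fun v => v) := by
  by_cases h : a < b <;> simp [PySem.List.max?, h]

-- max over the values list is snd of the running first-max over the pairs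
theorem pvMax?_values (t : List (String × Int)) :
    ∀ m, PySem.List.max? (m.2 :: t.map (fun p => p.2)) (fun v => v) = some ((pvFm m t).2) := by
  induction t with
  | nil => intro m; simp [PySem.List.max?, pvFm]
  | cons x t ih =>
      intro m
      rw [List.map_cons, pvMax?_vals_two, pvFm_cons]
      by_cases h : m.2 < x.2
      · rw [if_pos h, if_pos h]; exact ih x
      · rw [if_neg h, if_neg h]; exact ih m

-- the running first-max either is the seed (and nothing beats it) or splits the list,
-- with the seed and everything strictly before it strictly smaller
theorem pvFm_decomp (t : List (String × Int)) :
    ∀ m, (pvFm m t = m ∧ ∀ x ∈ t, ¬ m.2 < x.2)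
      ∨ (∃ pre suf, t = pre ++ pvFm m t :: suf ∧ m.2 < (pvFm m t).2 ∧
          ∀ x ∈ pre, x.2 < (pvFm m t).2) := by
  induction t with
  | nil => intro m; exact Or.inl ⟨rfl, by simp⟩
  | cons x t ih =>
      intro m
      rw [pvFm_cons]
      by_cases h : m.2 < x.2
      · rw [if_pos h]
        rcases ih x with ⟨heq, hall⟩ | ⟨pre, suf, hsplit, hlt, hpre⟩
        · exact Or.inr ⟨[], t, by rw [heq]; simp, by rw [heq]; exact h, by simp⟩
        · refine Or.inr ⟨x :: pre, suf, by rw [List.cons_append, ← hsplit], h.trans hlt, ?_⟩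
          intro y hy
          rcases List.mem_cons.mp hy with rfl | hy
          · exact hlt
          · exact hpre y hy
      · rw [if_neg h]
        rcases ih m with ⟨heq, hall⟩ | ⟨pre, suf, hsplit, hlt, hpre⟩
        · refine Or.inl ⟨heq, ?_⟩
          intro y hy
          rcases List.mem_cons.mp hy with rfl | hy
          · exact h
          · exact hall y hy
        · refine Or.inr ⟨x :: pre, suf, by rw [List.cons_append, ← hsplit], hlt, ?_⟩
          intro y hy
          rcases List.mem_cons.mp hy with rfl | hy
          · exact lt_of_le_of_lt (le_of_not_gt h) hlt
          · exact hpre y hy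

theorem pvFilter_head_core (x r : String × Int) (pre suf : List (String × Int))
    (hx : x.2 < r.2) (hpre : ∀ y ∈ pre, y.2 < r.2) :
    ((x :: (pre ++ r :: suf)).filter (fun p => p.2 == r.2)).head? = some r := by
  have hxf : (x.2 == r.2) = false := by simp [ne_of_lt hx]
  have hpf : pre.filter (fun p : String × Int => p.2 == r.2) = [] :=
    List.filter_eq_nil_iff.mpr (fun y hy => by simp [ne_of_lt (hpre y hy)])
  simp [List.filter_append, hxf, hpf]

-- head of the filter "score equals the max score" is the running first-max
theorem pvFilter_head (x : String × Int) (t : List (String × Int)) :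
    ((x :: t).filter (fun p => p.2 == (pvFm x t).2)).head? = some (pvFm x t) := by
  rcases pvFm_decomp t x with ⟨heq, _⟩ | ⟨pre, suf, hsplit, hlt, hpre⟩
  · rw [heq]; simp
  · generalize hg : pvFm x t = r at hsplit hlt hpre ⊢
    rw [hsplit]
    exact pvFilter_head_core x r pre suf hlt hpre

-- building A's counts dict over distinct keys appends each item unchanged
theorem pvCounts_build (l : List (String × Int)) :
    ∀ (d : PySem.Dict String Int),
      (∀ k ∈ l.map Prod.fst, d.get? k = none) → (l.map Prod.fst).Nodup →
      l.foldl (fun c p =>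
        match c.get? p.1 with
        | some old => c.insert p.1 (old + p.2)
        | none     => c.insert p.1 p.2) d = ⟨d.items ++ l⟩ := by
  induction l with
  | nil => intro d _ _; simp
  | cons p l ih =>
      intro d hnone hnd
      have hp : d.get? p.1 = none := hnone p.1 (by simp)
      have hc : d.contains p.1 = false :=
        (PySem.Dict.get?_eq_none_iff_contains d p.1).mp hp
      have hins : (match d.get? p.1 with
          | some old => d.insert p.1 (old + p.2)
          | none     => d.insert p.1 p.2) = (⟨d.items ++ [p]⟩ : PySem.Dict String Int) := by
        rw [hp]
        simp only [PySem.Dict.insert, hc]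
        simp
      simp only [List.foldl_cons, hins]
      rw [ih ⟨d.items ++ [p]⟩ ?_ (by simpa using hnd.of_cons)]
      · simp
      · intro k hk
        have hkp : k ≠ p.1 := by
          intro h; subst h
          exact (List.nodup_cons.mp (by simpa using hnd)).1 hk
        have hdk : d.get? k = none := hnone k (by simp [hk])
        have hpk : (p.1 == k) = false := by simp [Ne.symm hkp]
        simp only [PySem.Dict.get?, List.find?_append] at hdk ⊢
        cases hfind : (d.items.find? (fun q => q.1 == k)) with
        | some q => simp [hfind] at hdk
        | none => simp [List.find?, hpk]

theorem pvGet0_head (l : List (String × Int)) :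
    PySem.List.pyGet? l 0 = l.head? := by
  cases l <;> simp [PySem.List.pyGet?, PySem.List.pyIdx?]

theorem pvGet0_head_str (l : List String) :
    PySem.List.pyGet? l 0 = l.head? := by
  cases l <;> simp [PySem.List.pyGet?, PySem.List.pyIdx?]

-- head of B's insertion step is the running first-max update
theorem pvInsertBy_head (x h : String × Int) (t : List (String × Int)) :
    PySem.List.insertBy (fun a b => decide (b.2 < a.2)) x (h :: t)
      = if h.2 < x.2 then x :: h :: t
        else h :: PySem.List.insertBy (fun a b => decide (b.2 < a.2)) x t := by
  by_cases hb : h.2 < x.2 <;> simp [PySem.List.insertBy, hb]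

theorem pvSortFold_head (t : List (String × Int)) :
    ∀ (acc : List (String × Int)) (m : String × Int), acc.head? = some m →
    (t.foldl (fun a x => PySem.List.insertBy (fun a b => decide (b.2 < a.2)) x a) acc).head?
      = some (pvFm m t) := by
  induction t with
  | nil => intro acc m h; exact h
  | cons x t ih =>
      intro acc m h
      cases acc with
      | nil => simp at h
      | cons a acc' =>
          have ham : a = m := by simpa using h
          subst ham
          rw [List.foldl_cons, pvInsertBy_head, pvFm_cons]
          by_cases hb : a.2 < x.2
          · rw [if_pos hb, if_pos hb]
            exact ih _ x rfl
          · rw [if_neg hb, if_neg hb]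
            exact ih _ a rfl

-- head of B's stable descending sort is the running first-max
theorem pvSorted_head (x : String × Int) (t : List (String × Int)) :
    (PySem.List.sorted (x :: t) (fun kv => kv.2) true).head? = some (pvFm x t) := by
  rw [PySem.List.sorted_rev_eq_foldl_insertBy]
  rw [List.foldl_cons]
  exact pvSortFold_head t _ x rfl

-- ===== VERDICT (by name: the statement is the Claim_ definition above) =====
theorem guess_department_spec : Claim_equal_guess_department := by
  intro depts _ hpre
  obtain ⟨hne, hnd⟩ := hpre
  unfold Spec_guess_department guess_department guess_department_alt
  cases depts with
  | nil => exact absurd rfl hne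
  | cons x t =>
      have hbuild := pvCounts_build (x :: t) ⟨[]⟩ (by intro k _; rfl) hnd
      simp only [hbuild, PySem.Dict.values, List.nil_append, List.map_cons]
      rw [show (List.map (fun p : String × Int => p.2) t) = t.map (fun p => p.2) from rfl]
      rw [pvMax?_values t x]
      have hfun : (fun p : String × Int =>
          match (some ((pvFm x t).2) : Option Int) with
          | some m => p.2 == m
          | none => false) = (fun p : String × Int => p.2 == (pvFm x t).2) := rfl
      rw [hfun]
      rw [pvGet0_head_str, List.head?_map, pvFilter_head]
      rw [pvGet0_head, pvSorted_head]
      rfl
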